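-- pv_equiv track=rewrite | github.com/seoul-ssafy-class-2-studyclub/GaYoung_SSAFY | test/11번가_2020/task3.py | solution
-- ===== SOURCE A (Python) =====
-- def solution(A):
--     visit = {}
--     max_num = len(A)
--     for i in range(max_num):
--         visit[i + 1] = 0
--
--     for i in range(len(A)):
--         visit[A[i]] += 1
--
--     need = []
--     have = []
--     for key, val in visit.items():
--         if val == 0:
--             need.append(key)
--         elif val > 1:
--             have.append(key)
--
--     cnt = 0
--     for i in range(len(need)):
--         cnt += abs(need[i] - have[i])
--
--     return cnt
-- ===== SOURCE B (Python) =====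
-- def solution(A):
--     s = sorted(A)
--     present = set(A)
--     need = [v for v in range(1, len(A) + 1) if v not in present]
--     have = [y for x, y in zip(s, s[1:]) if x == y]
--     cnt = 0
--     for i in range(len(need)):
--         cnt += abs(need[i] - have[i])
--     return cnt
-- ===== Notes on version B (the rewrite author's own statement) =====
-- stated objective: alternative
-- what changed: Replaced the dict of counts over keys 1..n (three passes: init dict, count, scan items) by sort-and-scan: need comes from a set-membership filter over 1..n and have from adjacent equal pairs in a sorted copy.
import Mathlib
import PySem

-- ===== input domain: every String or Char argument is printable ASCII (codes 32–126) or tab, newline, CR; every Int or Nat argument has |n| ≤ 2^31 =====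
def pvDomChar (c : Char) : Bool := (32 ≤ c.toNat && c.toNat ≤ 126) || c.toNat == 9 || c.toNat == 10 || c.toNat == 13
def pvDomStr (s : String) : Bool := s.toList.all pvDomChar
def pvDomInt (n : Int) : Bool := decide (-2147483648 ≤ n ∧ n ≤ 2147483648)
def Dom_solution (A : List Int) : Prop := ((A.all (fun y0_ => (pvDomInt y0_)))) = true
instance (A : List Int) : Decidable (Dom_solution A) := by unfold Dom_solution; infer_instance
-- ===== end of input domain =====

-- B replaces A's dict-of-counts over keys 1..n by sort-and-scan (set filter for `need`,
-- adjacent equal pairs of the sorted copy for `have`); equal return value on Pre_.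

-- ===== PORT A =====
def solution (A : List Int) : Int :=
  let maxNum : Int := (A.length : Int)
  let visit : PySem.Dict Int Int :=
    (PySem.List.pyRange 0 maxNum 1).foldl (fun d i => d.insert (i + 1) 0) PySem.Dict.empty
  let visit :=
    (PySem.List.pyRange 0 (A.length : Int) 1).foldl
      (fun d i => d.modify (PySem.List.pyGetD A i 0) 0 (· + 1)) visit
  let nh : List Int × List Int :=
    visit.items.foldl
      (fun p kv =>
        if kv.2 = 0 then (p.1 ++ [kv.1], p.2)
        else if kv.2 > 1 then (p.1, p.2 ++ [kv.1])
        else p) ([], [])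
  let need := nh.1
  let haveL := nh.2
  (PySem.List.pyRange 0 (need.length : Int) 1).foldl
    (fun cnt i => cnt + |PySem.List.pyGetD need i 0 - PySem.List.pyGetD haveL i 0|) 0

-- ===== PORT B =====
def solution_alt (A : List Int) : Int :=
  let s := PySem.List.sorted A (fun x => x) false
  let present : PySem.Set Int := PySem.Set.ofList A
  let need := (PySem.List.pyRange 1 ((A.length : Int) + 1) 1).filter
      (fun v => !(PySem.Set.contains present v))
  let haveL := ((s.zip (PySem.List.slice s (some 1) none)).filter
      (fun p => p.1 == p.2)).map (·.2)
  (PySem.List.pyRange 0 (need.length : Int) 1).foldl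
    (fun cnt i => cnt + |PySem.List.pyGetD need i 0 - PySem.List.pyGetD haveL i 0|) 0

-- ===== PRECONDITION & SPEC =====
-- Pre_ excludes exactly the inputs on which A raises: an element outside 1..len(A)
-- (KeyError in the counting loop) or a value occurring three or more times
-- (IndexError: `have` ends up shorter than `need`). A returns on every input in Pre_.
def Pre_solution (A : List Int) : Prop :=
  (∀ x ∈ A, 1 ≤ x ∧ x ≤ (A.length : Int)) ∧ (∀ x ∈ A, A.count x ≤ 2)
instance (A : List Int) : Decidable (Pre_solution A) := by unfold Pre_solution; infer_instance

def pvWitness_solution : List Int := [2, 1, 2]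

def Spec_solution (A : List Int) (out : Int) : Prop := out = solution_alt A
instance (A : List Int) (out : Int) : Decidable (Spec_solution A out) := by unfold Spec_solution; infer_instance

-- ===== CLAIM (what is proved, stated in full; the proofs are below) =====
def Claim_equal_solution : Prop :=
  ∀ (A : List Int), Dom_solution A → Pre_solution A → Spec_solution A (solution A)

-- ===== LEMMAS AND PROOFS =====

-- `need`/`have` as one pass with a pair accumulator (A's single loop over visit.items)
theorem pvPairFold (l : List (Int × Int)) (acc : List Int × List Int) :
    l.foldl (fun p kv =>
        if kv.2 = 0 then (p.1 ++ [kv.1], p.2)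
        else if kv.2 > 1 then (p.1, p.2 ++ [kv.1])
        else p) acc
      = (acc.1 ++ (l.filter (fun kv => kv.2 == 0)).map (·.1),
         acc.2 ++ (l.filter (fun kv => decide (kv.2 > 1))).map (·.1)) := by
  induction l generalizing acc with
  | nil => simp
  | cons kv t ih =>
    by_cases h0 : kv.2 = 0
    · simp [h0, ih]
    · by_cases h1 : kv.2 > 1
      · have : ¬ (kv.2 == 0) = true := by simpa using h0
        simp [h0, h1, ih, this]
      · simp [h0, h1, ih]

-- range(0,n) shifted by one is range(1,n+1)
theorem pvRangeShift (n : Nat) :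
    (PySem.List.pyRange 0 (n : Int) 1).map (fun i => i + 1)
      = PySem.List.pyRange 1 ((n : Int) + 1) 1 := by
  rw [PySem.List.pyRange_one, PySem.List.pyRange_one]
  simp [List.map_map]
  intro a _
  omega

-- updating a set with elements it already has changes nothing
theorem pvSetUpdateNoop (l : List Int) (s : PySem.Set Int) (h : ∀ x ∈ l, x ∈ s) :
    PySem.Set.update s l = s := by
  induction l generalizing s with
  | nil => rfl
  | cons a t ih =>
    have ha : a ∈ s := h a (by simp)
    have : PySem.Set.add s a = s := by
      simp [PySem.Set.add, PySem.Set.contains_iff, ha]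
    show PySem.Set.update (PySem.Set.add s a) t = s
    rw [this]
    exact ih s (fun x hx => h x (by simp [hx]))

-- the initialising loop: visit = {1:0, …, n:0}
theorem pvInitItems (n : Nat) :
    ((PySem.List.pyRange 0 (n : Int) 1).foldl
        (fun d i => d.insert (i + 1) 0) (PySem.Dict.empty : PySem.Dict Int Int)).items
      = (PySem.List.pyRange 1 ((n : Int) + 1) 1).map (fun k => (k, (0 : Int))) := by
  rw [PySem.Dict.items_foldl_insert_fresh _ (fun i => i + 1) (fun _ => 0) _
      (fun a _ => PySem.Dict.contains_empty _)
      (by rw [pvRangeShift]; exact PySem.List.nodup_pyRange_one 1 ((n : Int) + 1))]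
  have : (PySem.Dict.empty : PySem.Dict Int Int).items = [] := rfl
  rw [this, List.nil_append, ← pvRangeShift]
  simp [List.map_map]

theorem pvInitKeys (n : Nat) :
    ((PySem.List.pyRange 0 (n : Int) 1).foldl
        (fun d i => d.insert (i + 1) 0) (PySem.Dict.empty : PySem.Dict Int Int)).keys
      = PySem.List.pyRange 1 ((n : Int) + 1) 1 := by
  show (((PySem.List.pyRange 0 (n : Int) 1).foldl
        (fun d i => d.insert (i + 1) 0) (PySem.Dict.empty : PySem.Dict Int Int)).items).map (·.1)
      = _
  rw [pvInitItems, List.map_map]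
  exact List.map_id'' (fun _ => rfl) _

theorem pvInitGetD (n : Nat) (v : Int) :
    ((PySem.List.pyRange 0 (n : Int) 1).foldl
        (fun d i => d.insert (i + 1) 0) (PySem.Dict.empty : PySem.Dict Int Int)).getD v 0 = 0 := by
  set d := (PySem.List.pyRange 0 (n : Int) 1).foldl
      (fun d i => d.insert (i + 1) 0) (PySem.Dict.empty : PySem.Dict Int Int) with hd
  by_cases hc : d.contains v = true
  · have hv : v ∈ d.keys := (PySem.Dict.contains_iff_mem_keys d v).mp hc
    rw [pvInitKeys] at hv
    have hmem : (v, (0 : Int)) ∈ d.items := by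
      rw [hd, pvInitItems]
      exact List.mem_map.mpr ⟨v, hv, rfl⟩
    exact PySem.Dict.getD_of_mem_items d hmem
      (by rw [hd, pvInitKeys]; exact PySem.List.nodup_pyRange_one _ _) 0
  · exact PySem.Dict.getD_of_not_contains d 0 (by simpa using hc)

-- adjacent duplicates of a list (B's zip-filter), recursively
def pvAdp (s : List Int) : List Int :=
  ((s.zip s.tail).filter (fun p => p.1 == p.2)).map (·.2)

theorem pvAdp_cons₂ (a b : Int) (t : List Int) :
    pvAdp (a :: b :: t) = (if a = b then [b] else []) ++ pvAdp (b :: t) := by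
  by_cases h : a = b <;> simp [pvAdp, h]

theorem pvMemAdp (s : List Int) (hs : s.Pairwise (· ≤ ·)) (hc : ∀ v, s.count v ≤ 2) :
    ∀ v, v ∈ pvAdp s ↔ 1 < s.count v := by
  induction s with
  | nil => intro v; simp [pvAdp]
  | cons a t ih =>
    intro v
    match t with
    | [] =>
      constructor
      · intro h; simp [pvAdp] at h
      · intro h
        have hle := List.count_le_length (a := v) (l := [a])
        simp at hle
        omega
    | b :: t' =>
      have hst : (b :: t').Pairwise (· ≤ ·) := hs.of_cons
      have hct : ∀ w, (b :: t').count w ≤ 2 := by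
        intro w
        have h1 : (b :: t').count w ≤ (a :: b :: t').count w := by
          rw [List.count_cons (a := w) (b := a)]
          omega
        exact le_trans h1 (hc w)
      have ihv := ih hst hct
      rw [pvAdp_cons₂]
      by_cases hab : a = b
      · subst hab
        have ht'0 : t'.count a = 0 := by
          have h2 := hc a
          simp at h2
          omega
        by_cases hva : v = a
        · rw [hva]
          constructor
          · intro _
            rw [List.count_cons_self, List.count_cons_self, ht'0]
            norm_num
          · intro _
            simp
        · have h1 : (a :: a :: t').count v = (a :: t').count v := by
            simp [Ne.symm hva]
          simp only [List.mem_cons]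
          rw [h1, ← ihv v]
          simp [hva]
      · simp only [if_neg hab, List.nil_append]
        by_cases hva : v = a
        · rw [hva]
          have hvb : a ∉ b :: t' := by
            intro hmem
            have h1 : a ≤ b := (List.pairwise_cons.mp hs).1 b (by simp)
            rcases List.mem_cons.mp hmem with h | h
            · exact hab h
            · have h2 : b ≤ a := (List.pairwise_cons.mp hst).1 a h
              exact hab (le_antisymm h1 h2)
          have hcnt0 : (b :: t').count a = 0 := List.count_eq_zero.mpr hvb
          have hcnt1 : (a :: b :: t').count a = 1 := by
            rw [List.count_cons_self, hcnt0]
          rw [ihv a, hcnt0, hcnt1]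
          simp
        · rw [ihv v]
          have h1 : (a :: b :: t').count v = (b :: t').count v := by
            simp [Ne.symm hva]
          rw [h1]

theorem pvPairwiseAdp (s : List Int) (hs : s.Pairwise (· ≤ ·)) (hc : ∀ v, s.count v ≤ 2) :
    (pvAdp s).Pairwise (· < ·) := by
  induction s with
  | nil => simp [pvAdp]
  | cons a t ih =>
    match t with
    | [] => simp [pvAdp]
    | b :: t' =>
      have hst : (b :: t').Pairwise (· ≤ ·) := hs.of_cons
      have hct : ∀ w, (b :: t').count w ≤ 2 := by
        intro w
        have h1 : (b :: t').count w ≤ (a :: b :: t').count w := by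
          rw [List.count_cons (a := w) (b := a)]
          omega
        exact le_trans h1 (hc w)
      have iht := ih hst hct
      rw [pvAdp_cons₂]
      by_cases hab : a = b
      · subst hab
        have ht'0 : t'.count a = 0 := by
          have h2 := hc a
          simp at h2
          omega
        rw [if_pos rfl, List.singleton_append, List.pairwise_cons]
        refine ⟨?_, iht⟩
        intro y hy
        have hcy : 1 < (a :: t').count y := (pvMemAdp _ hst hct y).mp hy
        have hya : y ≠ a := by
          intro h; subst h
          simp [ht'0] at hcy
        have hyt' : y ∈ t' := by
          have : y ∈ a :: t' := by
            by_contra hny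
            rw [List.count_eq_zero.mpr hny] at hcy; omega
          rcases List.mem_cons.mp this with h | h
          · exact absurd h hya
          · exact h
        have : a ≤ y := (List.pairwise_cons.mp hst).1 y hyt'
        exact lt_of_le_of_ne this (fun h => hya h.symm)
      · simpa [hab] using iht

-- the counting loop leaves exactly the counts {k: A.count k for k in 1..n}
theorem pvVisitItems (A : List Int) (hpre : Pre_solution A) :
    ((PySem.List.pyRange 0 ((A.length : Int)) 1).foldl
        (fun d i => d.modify (PySem.List.pyGetD A i 0) 0 (· + 1))
        ((PySem.List.pyRange 0 ((A.length : Int)) 1).foldl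
          (fun d i => d.insert (i + 1) 0) (PySem.Dict.empty : PySem.Dict Int Int))).items
      = (PySem.List.pyRange 1 ((A.length : Int) + 1) 1).map
          (fun k => (k, (A.count k : Int))) := by
  set d0 := (PySem.List.pyRange 0 ((A.length : Int)) 1).foldl
      (fun d i => d.insert (i + 1) 0) (PySem.Dict.empty : PySem.Dict Int Int) with hd0
  rw [PySem.List.foldl_pyRange_zero_pyGetD' A 0 (fun d x => d.modify x 0 (· + 1)) d0]
  set d1 := A.foldl (fun d x => d.modify x 0 (· + 1)) d0 with hd1
  have hkeys : d1.keys = PySem.List.pyRange 1 ((A.length : Int) + 1) 1 := by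
    rw [hd1]
    rw [PySem.Dict.keys_foldl_modify A 0 (fun _ _ => (· + 1)) d0]
    rw [pvInitKeys]
    apply pvSetUpdateNoop
    intro x hx
    have := hpre.1 x hx
    exact PySem.List.mem_pyRange_one.mpr ⟨this.1, by omega⟩
  have hnd : d1.keys.Nodup := by
    rw [hkeys]; exact PySem.List.nodup_pyRange_one _ _
  rw [PySem.Dict.items_eq_map_keys d1 hnd 0, hkeys]
  apply List.map_congr_left
  intro k _
  have : d1.getD k 0 = d0.getD k 0 + (A.count k : Int) :=
    PySem.Dict.getD_foldl_modify_add_one A d0 k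
  rw [this, hd0, pvInitGetD]
  simp

-- a strictly increasing list with the same members as another strictly increasing list equals it
theorem pvStrictEq (l₁ l₂ : List Int) (h₁ : l₁.Pairwise (· < ·)) (h₂ : l₂.Pairwise (· < ·))
    (hmem : ∀ v, v ∈ l₁ ↔ v ∈ l₂) : l₁ = l₂ := by
  have hn₁ : l₁.Nodup := h₁.imp (fun h => ne_of_lt h)
  have hn₂ : l₂.Nodup := h₂.imp (fun h => ne_of_lt h)
  have hperm : l₁.Perm l₂ := (List.perm_ext_iff_of_nodup hn₁ hn₂).mpr hmem
  exact hperm.eq_of_pairwise (le := (· ≤ ·)) (fun a b _ _ hab hba => le_antisymm hab hba) (h₁.imp le_of_lt) (h₂.imp le_of_lt)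

-- A's `need` list equals B's (set-membership filter over 1..n)
theorem pvNeedEq (A : List Int) :
    List.map ((fun x : Int × Int => x.1) ∘ fun k => (k, ((List.count k A : Int))))
      (List.filter ((fun kv : Int × Int => kv.2 == 0) ∘ fun k => (k, ((List.count k A : Int))))
        (PySem.List.pyRange 1 ((A.length : Int) + 1) 1))
    = List.filter (fun v => !(PySem.Set.ofList A).contains v)
        (PySem.List.pyRange 1 ((A.length : Int) + 1) 1) := by
  have hmap : List.map ((fun x : Int × Int => x.1) ∘ fun k => (k, ((List.count k A : Int))))
      = List.map (fun k : Int => k) := by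
    funext l
    apply List.map_congr_left
    intro k _
    rfl
  rw [hmap, List.map_id']
  apply List.filter_congr
  intro x _
  by_cases hx : x ∈ A
  · have h1 : A.count x ≠ 0 := by simpa [List.count_eq_zero] using hx
    have h2 : (PySem.Set.ofList A).contains x = true :=
      (PySem.Set.contains_iff _ _).mpr ((PySem.Set.mem_ofList A x).mpr hx)
    simp [Function.comp, hx, Int.natCast_eq_zero, h1]
  · have h1 : A.count x = 0 := List.count_eq_zero.mpr hx
    have h2 : (PySem.Set.ofList A).contains x = false := by
      by_contra h
      exact hx ((PySem.Set.mem_ofList A x).mp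
        ((PySem.Set.contains_iff _ _).mp (Bool.of_not_eq_false h)))
    simpa [Function.comp, h1, h2] using hx

-- A's `have` list equals B's (adjacent equal pairs of the sorted copy)
theorem pvHaveEq (A : List Int) (hpre : Pre_solution A) :
    List.map ((fun x : Int × Int => x.1) ∘ fun k => (k, ((List.count k A : Int))))
      (List.filter ((fun kv : Int × Int => decide (kv.2 > 1)) ∘ fun k => (k, ((List.count k A : Int))))
        (PySem.List.pyRange 1 ((A.length : Int) + 1) 1))
    = List.map (fun x : Int × Int => x.2)
        (List.filter (fun p : Int × Int => p.1 == p.2)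
          ((PySem.List.sorted A (fun x => x)).zip
            (PySem.List.slice (PySem.List.sorted A (fun x => x)) (some 1)))) := by
  rw [PySem.List.slice_from_one]
  show _ = pvAdp (PySem.List.sorted A (fun x => x))
  set s := PySem.List.sorted A (fun x => x) with hsdef
  have hcnt : ∀ v, s.count v = A.count v := fun v =>
    (PySem.List.sorted_perm A (fun x => x) false).count_eq v
  have hsp : s.Pairwise (· ≤ ·) := PySem.List.sorted_pairwise A (fun x => x)
  have hsc : ∀ v, s.count v ≤ 2 := by
    intro v
    rw [hcnt]
    by_cases hv : v ∈ A
    · exact hpre.2 v hv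
    · rw [List.count_eq_zero.mpr hv]
      omega
  have hmap : List.map ((fun x : Int × Int => x.1) ∘ fun k => (k, ((List.count k A : Int))))
      = List.map (fun k : Int => k) := by
    funext l
    apply List.map_congr_left
    intro k _
    rfl
  rw [hmap, List.map_id']
  apply pvStrictEq
  · exact (PySem.List.pairwise_lt_pyRange_one 1 ((A.length : Int) + 1)).filter _
  · exact pvPairwiseAdp s hsp hsc
  · intro v
    rw [List.mem_filter, pvMemAdp s hsp hsc v, hcnt]
    constructor
    · rintro ⟨_, h⟩
      simp [Function.comp] at h
      omega
    · intro h
      have hv : v ∈ A := by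
        by_contra hnv
        rw [List.count_eq_zero.mpr hnv] at h
        omega
      have hb := hpre.1 v hv
      refine ⟨PySem.List.mem_pyRange_one.mpr ⟨hb.1, by omega⟩, ?_⟩
      simp [Function.comp]
      omega

-- ===== VERDICT (by name: the statement is the Claim_ definition above) =====
theorem solution_spec : Claim_equal_solution := by
  intro A _ hpre
  show solution A = solution_alt A
  simp only [solution, solution_alt]
  rw [pvVisitItems A hpre, pvPairFold]
  simp only [List.nil_append, List.filter_map, List.map_map]
  rw [pvNeedEq A, pvHaveEq A hpre]
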